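-- pv_equiv track=rewrite | github.com/olgaObnosova/EGE | №25/4943.py | f
-- ===== SOURCE A (Python) =====
-- def f(N):
--     s = set()
--     for d in range(2, int(N**0.5)+1):
--         if N % d == 0:  # делитель
--             if d % 2 != 0:  # нечетный делитель
--                 s.add(d)
--             dd = N // d  # обратный делитель
--             if dd % 2 != 0:  # нечетный обратный делитель
--                 s.add(dd)
--     if len(s) >= 5:
--         return (sorted(s)[-5], len(s))
--     else:
--         return (0, 0)
-- ===== SOURCE B (Python) =====
-- def f(N):
--     m = N
--     while m > 0 and m % 2 == 0:
--         m //= 2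
--     divs = set()
--     for d in range(1, int(m ** 0.5) + 1):
--         if m % d == 0:
--             divs.add(d)
--             divs.add(m // d)
--     divs.discard(1)
--     divs.discard(N)
--     if len(divs) >= 5:
--         return (sorted(divs)[-5], len(divs))
--     else:
--         return (0, 0)
-- ===== Notes on version B (the rewrite author's own statement) =====
-- stated objective: alternative
-- what changed: B strips all factors of 2 from N first and then enumerates every divisor of the remaining odd part by d / m//d pairing starting from 1, discarding 1 and N at the end, instead of A's scan over divisors of N with per-candidate parity tests.
import Mathlib
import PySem

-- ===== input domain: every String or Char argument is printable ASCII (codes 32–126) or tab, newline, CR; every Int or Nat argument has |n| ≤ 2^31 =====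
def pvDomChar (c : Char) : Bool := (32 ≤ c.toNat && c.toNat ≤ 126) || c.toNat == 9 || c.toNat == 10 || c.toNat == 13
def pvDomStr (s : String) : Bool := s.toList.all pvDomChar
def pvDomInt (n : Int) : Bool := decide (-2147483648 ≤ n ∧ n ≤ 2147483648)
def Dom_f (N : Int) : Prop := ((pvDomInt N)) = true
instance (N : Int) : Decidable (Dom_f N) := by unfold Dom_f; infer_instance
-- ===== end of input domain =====

-- B strips the factors of 2 from N first and enumerates ALL divisors of the remaining odd
-- part, discarding 1 and N at the end, instead of A's parity-tested divisor scan of N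
-- (alternative algorithm of similar cost).

-- ===== PORT A =====
-- loop body of A, named so the proofs can speak about it
def stepA (N : Int) (s : PySem.Set Int) (d : Int) : PySem.Set Int :=
  if PySem.Int.mod N d = 0 then                           -- if N % d == 0
    let s1 := if PySem.Int.mod d 2 ≠ 0 then PySem.Set.add s d else s
    let dd := PySem.Int.floordiv N d
    if PySem.Int.mod dd 2 ≠ 0 then PySem.Set.add s1 dd else s1
  else s

-- int(N**0.5) is ported as Int.sqrt N: exact on the admitted inputs 0 ≤ N ≤ 2^31
def f (N : Int) : Int × Int :=
  let s : PySem.Set Int :=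
    (PySem.List.pyRange 2 (Int.sqrt N + 1) 1).foldl (stepA N) PySem.Set.empty
  if 5 ≤ PySem.Set.len s then
    -- sorted(s)[-5]: the index is in range because len(s) ≥ 5, so the .getD default is unreachable
    ((PySem.List.pyGet? (PySem.List.sorted s (fun x => x) false) (-5)).getD 0, PySem.Set.len s)
  else (0, 0)

-- ===== PORT B =====
-- while m > 0 and m % 2 == 0: m //= 2
def oddPart (m : Int) : Int :=
  if h : 0 < m ∧ PySem.Int.mod m 2 = 0 then oddPart (PySem.Int.floordiv m 2) else m
termination_by m.toNat
decreasing_by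
  rcases h with ⟨h1, -⟩
  rw [PySem.Int.floordiv_eq_ediv_of_pos (by omega : (0:Int) < 2)]
  omega

-- loop body of B
def stepB (m : Int) (s : PySem.Set Int) (d : Int) : PySem.Set Int :=
  if PySem.Int.mod m d = 0 then
    PySem.Set.add (PySem.Set.add s d) (PySem.Int.floordiv m d)
  else s

def f_alt (N : Int) : Int × Int :=
  let m := oddPart N
  let divs : PySem.Set Int :=
    (PySem.List.pyRange 1 (Int.sqrt m + 1) 1).foldl (stepB m) PySem.Set.empty
  let divs2 := PySem.Set.discard (PySem.Set.discard divs 1) N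
  if 5 ≤ PySem.Set.len divs2 then
    ((PySem.List.pyGet? (PySem.List.sorted divs2 (fun x => x) false) (-5)).getD 0, PySem.Set.len divs2)
  else (0, 0)

-- ===== PRECONDITION & SPEC =====
-- Pre_f excludes exactly N < 0, where Python A raises TypeError (N**0.5 is complex there)
def Pre_f (N : Int) : Prop := 0 ≤ N
instance (N : Int) : Decidable (Pre_f N) := by unfold Pre_f; infer_instance
def pvWitness_f : Int := 1215
def Spec_f (N : Int) (out : Int × Int) : Prop := out = f_alt N
instance (N : Int) (out : Int × Int) : Decidable (Spec_f N out) := by unfold Spec_f; infer_instance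

-- ===== CLAIM (what is proved, stated in full; the proofs are below) =====
def Claim_equal_f : Prop := ∀ (N : Int), Dom_f N → Pre_f N → Spec_f N (f N)

-- ===== LEMMAS AND PROOFS =====

-- Nat mirror of oddPart, for the arithmetic lemmas
def oddPartN (n : Nat) : Nat :=
  if 0 < n ∧ n % 2 = 0 then oddPartN (n / 2) else n
termination_by n
decreasing_by omega

theorem pv_mod_two (d : Nat) : PySem.Int.mod (d : Int) 2 = ((d % 2 : Nat) : Int) := by
  exact_mod_cast PySem.Int.mod_natCast d 2

theorem pv_fdiv_two (d : Nat) : PySem.Int.floordiv (d : Int) 2 = ((d / 2 : Nat) : Int) := by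
  exact_mod_cast PySem.Int.floordiv_natCast d 2

theorem oddPart_natCast (n : Nat) : oddPart (n : Int) = ((oddPartN n : Nat) : Int) := by
  induction n using Nat.strong_induction_on with
  | _ n ih =>
    rw [oddPart, oddPartN]
    by_cases hn : 0 < n ∧ n % 2 = 0
    · have hc : 0 < (n : Int) ∧ PySem.Int.mod (n : Int) 2 = 0 :=
        ⟨by exact_mod_cast hn.1, by rw [pv_mod_two]; exact_mod_cast hn.2⟩
      rw [dif_pos hc, if_pos hn, pv_fdiv_two]
      exact ih (n / 2) (by omega)
    · have hc : ¬(0 < (n : Int) ∧ PySem.Int.mod (n : Int) 2 = 0) := by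
        rintro ⟨h1, h2⟩
        rw [pv_mod_two] at h2
        exact hn ⟨by exact_mod_cast h1, by exact_mod_cast h2⟩
      rw [dif_neg hc, if_neg hn]

theorem oddPartN_odd (n : Nat) : 0 < n → oddPartN n % 2 = 1 := by
  induction n using Nat.strong_induction_on with
  | _ n ih =>
    rw [oddPartN]
    split_ifs with hc
    · intro _
      exact ih (n / 2) (by omega) (by omega)
    · intro h
      have h2 : ¬(n % 2 = 0) := fun he => hc ⟨h, he⟩
      omega

theorem dvd_oddPartN_iff (n k : Nat) (hk : k % 2 = 1) : k ∣ oddPartN n ↔ k ∣ n := by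
  induction n using Nat.strong_induction_on with
  | _ n ih =>
    rw [oddPartN]
    split_ifs with hc
    · rw [ih (n / 2) (by omega)]
      have h2 : 2 * (n / 2) = n := by omega
      constructor
      · intro h
        exact h.trans (Nat.div_dvd_of_dvd (Nat.dvd_of_mod_eq_zero hc.2))
      · intro h
        have hcop : Nat.Coprime k 2 := Nat.coprime_two_right.mpr (Nat.odd_iff.mpr hk)
        refine Nat.Coprime.dvd_of_dvd_mul_left hcop ?_
        rw [h2]
        exact h
    · exact Iff.rfl

-- one step of A's loop, as membership
theorem mem_stepA (N : Int) (s : PySem.Set Int) (d k : Int) :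
    k ∈ stepA N s d ↔ k ∈ s ∨ (PySem.Int.mod N d = 0 ∧
      ((PySem.Int.mod d 2 ≠ 0 ∧ k = d) ∨
       (PySem.Int.mod (PySem.Int.floordiv N d) 2 ≠ 0 ∧ k = PySem.Int.floordiv N d))) := by
  by_cases h1 : PySem.Int.mod N d = 0 <;>
  by_cases h2 : d % 2 = 1 <;>
  by_cases h3 : PySem.Int.floordiv N d % 2 = 1 <;>
  simp [stepA, h1, h2, h3, PySem.Set.mem_add] <;>
  tauto

theorem nodup_stepA (N : Int) (s : PySem.Set Int) (d : Int) (hs : s.Nodup) :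
    (stepA N s d).Nodup := by
  by_cases h1 : PySem.Int.mod N d = 0 <;>
  by_cases h2 : d % 2 = 1 <;>
  by_cases h3 : PySem.Int.floordiv N d % 2 = 1 <;>
  simp [stepA, h1, h2, h3] <;>
  first
    | exact hs
    | exact PySem.Set.nodup_add _ _ hs
    | exact PySem.Set.nodup_add _ _ (PySem.Set.nodup_add _ _ hs)

theorem mem_stepB (m : Int) (s : PySem.Set Int) (d k : Int) :
    k ∈ stepB m s d ↔ k ∈ s ∨ (PySem.Int.mod m d = 0 ∧
      (k = d ∨ k = PySem.Int.floordiv m d)) := by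
  by_cases h1 : PySem.Int.mod m d = 0 <;>
  simp [stepB, h1, PySem.Set.mem_add] <;>
  tauto

theorem nodup_stepB (m : Int) (s : PySem.Set Int) (d : Int) (hs : s.Nodup) :
    (stepB m s d).Nodup := by
  by_cases h1 : PySem.Int.mod m d = 0 <;>
  simp [stepB, h1] <;>
  first
    | exact hs
    | exact PySem.Set.nodup_add _ _ (PySem.Set.nodup_add _ _ hs)

theorem mem_foldl_stepA (N : Int) (l : List Int) (s : PySem.Set Int) (k : Int) :
    k ∈ l.foldl (stepA N) s ↔ k ∈ s ∨ ∃ d ∈ l, PySem.Int.mod N d = 0 ∧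
      ((PySem.Int.mod d 2 ≠ 0 ∧ k = d) ∨
       (PySem.Int.mod (PySem.Int.floordiv N d) 2 ≠ 0 ∧ k = PySem.Int.floordiv N d)) := by
  induction l generalizing s with
  | nil => simp
  | cons a l ih =>
    rw [List.foldl_cons, ih, mem_stepA]
    constructor
    · rintro ((h | h) | ⟨d, hd, hP⟩)
      · exact Or.inl h
      · exact Or.inr ⟨a, List.mem_cons_self, h⟩
      · exact Or.inr ⟨d, List.mem_cons_of_mem _ hd, hP⟩
    · rintro (h | ⟨d, hd, hP⟩)
      · exact Or.inl (Or.inl h)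
      · rcases List.mem_cons.mp hd with rfl | hd'
        · exact Or.inl (Or.inr hP)
        · exact Or.inr ⟨d, hd', hP⟩

theorem nodup_foldl_stepA (N : Int) (l : List Int) (s : PySem.Set Int) (hs : s.Nodup) :
    (l.foldl (stepA N) s).Nodup := by
  induction l generalizing s with
  | nil => exact hs
  | cons a l ih => exact ih _ (nodup_stepA N s a hs)

theorem mem_foldl_stepB (m : Int) (l : List Int) (s : PySem.Set Int) (k : Int) :
    k ∈ l.foldl (stepB m) s ↔ k ∈ s ∨ ∃ d ∈ l, PySem.Int.mod m d = 0 ∧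
      (k = d ∨ k = PySem.Int.floordiv m d) := by
  induction l generalizing s with
  | nil => simp
  | cons a l ih =>
    rw [List.foldl_cons, ih, mem_stepB]
    constructor
    · rintro ((h | h) | ⟨d, hd, hP⟩)
      · exact Or.inl h
      · exact Or.inr ⟨a, List.mem_cons_self, h⟩
      · exact Or.inr ⟨d, List.mem_cons_of_mem _ hd, hP⟩
    · rintro (h | ⟨d, hd, hP⟩)
      · exact Or.inl (Or.inl h)
      · rcases List.mem_cons.mp hd with rfl | hd'
        · exact Or.inl (Or.inr hP)
        · exact Or.inr ⟨d, hd', hP⟩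

theorem nodup_foldl_stepB (m : Int) (l : List Int) (s : PySem.Set Int) (hs : s.Nodup) :
    (l.foldl (stepB m) s).Nodup := by
  induction l generalizing s with
  | nil => exact hs
  | cons a l ih => exact ih _ (nodup_stepB m s a hs)

-- the arithmetic core on ℕ: what A's pairing collects
theorem keyA (n k : Nat) :
    (∃ d : Nat, 2 ≤ d ∧ d ≤ n.sqrt ∧ d ∣ n ∧
        ((d % 2 = 1 ∧ k = d) ∨ ((n / d) % 2 = 1 ∧ k = n / d)))
    ↔ (3 ≤ k ∧ k < n ∧ k % 2 = 1 ∧ k ∣ n) := by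
  constructor
  · rintro ⟨d, hd2, hds, hdvd, hcase⟩
    have hn4 : 4 ≤ n := by
      have h := Nat.le_sqrt.mp (Nat.le_trans hd2 hds)
      omega
    have hsn : n.sqrt < n := Nat.sqrt_lt_self (by omega)
    have hd0 : 0 < d := by omega
    rcases hcase with ⟨hodd, rfl⟩ | ⟨hodd, rfl⟩
    · exact ⟨by omega, by omega, hodd, hdvd⟩
    · have hq : n / d ∣ n := Nat.div_dvd_of_dvd hdvd
      have hqlt : n / d < n :=
        Nat.lt_of_le_of_lt (Nat.div_le_div_left hd2 (by omega)) (Nat.div_lt_self (by omega) (by omega))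
      have hsqpos : 0 < n.sqrt := by omega
      have hge : n.sqrt ≤ n / d := by
        have h1 : n.sqrt ≤ n / n.sqrt := (Nat.le_div_iff_mul_le hsqpos).mpr (Nat.sqrt_le n)
        have h2 : n / n.sqrt ≤ n / d := Nat.div_le_div_left hds hd0
        omega
      exact ⟨by omega, hqlt, hodd, hq⟩
  · rintro ⟨hk3, hkn, hkodd, hkdvd⟩
    have hn4 : 4 ≤ n := by omega
    have hk0 : 0 < k := by omega
    have hmul : k * (n / k) = n := Nat.mul_div_cancel' hkdvd
    have hq2 : 2 ≤ n / k := by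
      obtain ⟨q, hq⟩ : ∃ q, n / k = q := ⟨_, rfl⟩
      rw [hq] at hmul ⊢
      match q, hmul with
      | 0, hmul => rw [Nat.mul_zero] at hmul; omega
      | 1, hmul => rw [Nat.mul_one] at hmul; omega
      | (q+2), _ => omega
    by_cases hks : k ≤ n.sqrt
    · exact ⟨k, by omega, hks, hkdvd, Or.inl ⟨hkodd, rfl⟩⟩
    · push_neg at hks
      have hqle : n / k ≤ n.sqrt := by
        by_contra hgt
        push_neg at hgt
        have h1 : (n.sqrt + 1) * (n.sqrt + 1) ≤ k * (n / k) :=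
          Nat.mul_le_mul (by omega) (by omega)
        rw [hmul] at h1
        have h2 : n < (n.sqrt + 1) * (n.sqrt + 1) := Nat.lt_succ_sqrt n
        exact absurd (Nat.lt_of_lt_of_le h2 h1) (Nat.lt_irrefl n)
      have hkey : n / (n / k) = k := by
        have h1 : (n / k) * k = n := by rw [Nat.mul_comm]; exact hmul
        calc n / (n / k) = ((n / k) * k) / (n / k) := by rw [h1]
          _ = k := Nat.mul_div_cancel_left k (by omega)
      refine ⟨n / k, hq2, hqle, Nat.div_dvd_of_dvd hkdvd, Or.inr ⟨?_, hkey.symm⟩⟩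
      rw [hkey]
      exact hkodd

-- what B's pairing collects: all the divisors of m (for m > 0)
theorem keyB (m k : Nat) (hm : 0 < m) :
    (∃ d : Nat, 1 ≤ d ∧ d ≤ m.sqrt ∧ d ∣ m ∧ (k = d ∨ k = m / d)) ↔ k ∣ m := by
  constructor
  · rintro ⟨d, -, -, hdvd, hk⟩
    rcases hk with rfl | rfl
    · exact hdvd
    · exact Nat.div_dvd_of_dvd hdvd
  · intro hkdvd
    have hk0 : 0 < k := Nat.pos_of_dvd_of_pos hkdvd hm
    have hmul : k * (m / k) = m := Nat.mul_div_cancel' hkdvd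
    by_cases hks : k ≤ m.sqrt
    · exact ⟨k, hk0, hks, hkdvd, Or.inl rfl⟩
    · push_neg at hks
      have hq0 : 0 < m / k := by
        rcases Nat.eq_zero_or_pos (m / k) with h0 | h
        · rw [h0, Nat.mul_zero] at hmul; omega
        · exact h
      have hqle : m / k ≤ m.sqrt := by
        by_contra hgt
        push_neg at hgt
        have h1 : (m.sqrt + 1) * (m.sqrt + 1) ≤ k * (m / k) :=
          Nat.mul_le_mul (by omega) (by omega)
        rw [hmul] at h1
        have h2 : m < (m.sqrt + 1) * (m.sqrt + 1) := Nat.lt_succ_sqrt m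
        exact absurd (Nat.lt_of_lt_of_le h2 h1) (Nat.lt_irrefl m)
      have hkey : m / (m / k) = k := by
        have h1 : (m / k) * k = m := by rw [Nat.mul_comm]; exact hmul
        calc m / (m / k) = ((m / k) * k) / (m / k) := by rw [h1]
          _ = k := Nat.mul_div_cancel_left k hq0
      exact ⟨m / k, hq0, hqle, Nat.div_dvd_of_dvd hkdvd, Or.inr hkey.symm⟩

-- the two characterisations agree
theorem keyAB (n k : Nat) (hn : 0 < n) :
    (k ∣ oddPartN n ∧ k ≠ 1 ∧ k ≠ n) ↔ (3 ≤ k ∧ k < n ∧ k % 2 = 1 ∧ k ∣ n) := by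
  have hModd := oddPartN_odd n hn
  constructor
  · rintro ⟨hkM, hk1, hkn⟩
    have hkodd : k % 2 = 1 := by
      rcases Nat.even_or_odd k with he | ho
      · exfalso
        obtain ⟨t, rfl⟩ := he
        have h2 : 2 ∣ oddPartN n := dvd_trans ⟨t, by ring⟩ hkM
        omega
      · exact Nat.odd_iff.mp ho
    have hkdvdn : k ∣ n := (dvd_oddPartN_iff n k hkodd).mp hkM
    have hMpos : 0 < oddPartN n := by omega
    have hkpos : 0 < k := Nat.pos_of_dvd_of_pos hkM hMpos
    have hkle : k ≤ n := Nat.le_of_dvd hn hkdvdn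
    exact ⟨by omega, by omega, hkodd, hkdvdn⟩
  · rintro ⟨hk3, hkn, hkodd, hkdvd⟩
    exact ⟨(dvd_oddPartN_iff n k hkodd).mpr hkdvd, by omega, by omega⟩

-- Int-level membership in A's set
theorem memA (n : Nat) (k : Int) :
    k ∈ (PySem.List.pyRange 2 (Int.sqrt (n : Int) + 1) 1).foldl (stepA (n : Int)) PySem.Set.empty
    ↔ ∃ kn : Nat, k = (kn : Int) ∧ 3 ≤ kn ∧ kn < n ∧ kn % 2 = 1 ∧ kn ∣ n := by
  rw [mem_foldl_stepA]
  have hsq : Int.sqrt ((n : Nat) : Int) = ((n.sqrt : Nat) : Int) := Int.sqrt_natCast n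
  constructor
  · rintro (h | ⟨d, hdmem, hmod, hcase⟩)
    · simp [PySem.Set.empty] at h
    · rw [PySem.List.mem_pyRange_one, hsq] at hdmem
      obtain ⟨hd2, hdlt⟩ := hdmem
      obtain ⟨dn, rfl⟩ : ∃ dn : Nat, d = (dn : Int) :=
        ⟨d.toNat, (Int.toNat_of_nonneg (by omega)).symm⟩
      have hdn2 : 2 ≤ dn := by exact_mod_cast hd2
      have hdns : dn ≤ n.sqrt := by
        have : (dn : Int) ≤ (n.sqrt : Int) := by omega
        exact_mod_cast this
      rw [PySem.Int.mod_eq_zero_iff_dvd] at hmod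
      have hdvd : dn ∣ n := by exact_mod_cast hmod
      rcases hcase with ⟨hodd, rfl⟩ | ⟨hodd, rfl⟩
      · have hoddn : dn % 2 = 1 := by
          rw [pv_mod_two] at hodd
          omega
        exact ⟨dn, rfl, (keyA n dn).mp ⟨dn, hdn2, hdns, hdvd, Or.inl ⟨hoddn, rfl⟩⟩⟩
      · rw [PySem.Int.floordiv_natCast] at hodd ⊢
        have hoddq : (n / dn) % 2 = 1 := by
          rw [pv_mod_two] at hodd
          omega
        exact ⟨n / dn, rfl, (keyA n (n / dn)).mp ⟨dn, hdn2, hdns, hdvd, Or.inr ⟨hoddq, rfl⟩⟩⟩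
  · rintro ⟨kn, rfl, hk3, hkn, hkodd, hkdvd⟩
    right
    obtain ⟨d, hd2, hds, hdvd, hcase⟩ := (keyA n kn).mpr ⟨hk3, hkn, hkodd, hkdvd⟩
    refine ⟨(d : Int), ?_, ?_, ?_⟩
    · rw [PySem.List.mem_pyRange_one, hsq]
      have : (d : Int) ≤ (n.sqrt : Int) := by exact_mod_cast hds
      constructor
      · exact_mod_cast hd2
      · omega
    · rw [PySem.Int.mod_eq_zero_iff_dvd]
      exact_mod_cast hdvd
    · rcases hcase with ⟨ho, rfl⟩ | ⟨ho, rfl⟩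
      · left
        refine ⟨?_, rfl⟩
        rw [pv_mod_two]
        omega
      · right
        rw [PySem.Int.floordiv_natCast]
        refine ⟨?_, rfl⟩
        rw [pv_mod_two]
        omega

-- Int-level membership in B's set
theorem memB (n : Nat) (k : Int) :
    k ∈ PySem.Set.discard (PySem.Set.discard
        ((PySem.List.pyRange 1 (Int.sqrt (oddPart (n : Int)) + 1) 1).foldl
          (stepB (oddPart (n : Int))) PySem.Set.empty) 1) ((n : Nat) : Int)
    ↔ ∃ kn : Nat, k = (kn : Int) ∧ 3 ≤ kn ∧ kn < n ∧ kn % 2 = 1 ∧ kn ∣ n := by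
  simp only [PySem.Set.mem_discard]
  rw [mem_foldl_stepB, oddPart_natCast n]
  rcases Nat.eq_zero_or_pos n with rfl | hn
  · have h0 : oddPartN 0 = 0 := by rw [oddPartN]; norm_num
    rw [h0]
    have hnil : PySem.List.pyRange 1 (Int.sqrt ((0 : Nat) : Int) + 1) 1 = [] := by
      have hs0 : Int.sqrt ((0 : Nat) : Int) = 0 := by norm_num [Int.sqrt]
      rw [hs0]
      exact PySem.List.pyRange_one_eq_nil (by omega)
    constructor
    · rintro ⟨⟨hmem | ⟨d, hd, -⟩, -⟩, -⟩
      · simp [PySem.Set.empty] at hmem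
      · rw [hnil] at hd
        simp at hd
    · rintro ⟨kn, -, -, hlt, -⟩
      exact absurd hlt (Nat.not_lt_zero kn)
  · have hModd := oddPartN_odd n hn
    have hMpos : 0 < oddPartN n := by omega
    have hInner : (k ∈ (PySem.Set.empty : PySem.Set Int) ∨
        ∃ d ∈ PySem.List.pyRange 1 (Int.sqrt ((oddPartN n : Nat) : Int) + 1) 1,
          PySem.Int.mod ((oddPartN n : Nat) : Int) d = 0 ∧
          (k = d ∨ k = PySem.Int.floordiv ((oddPartN n : Nat) : Int) d))
        ↔ ∃ kn : Nat, k = (kn : Int) ∧ kn ∣ oddPartN n := by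
      constructor
      · rintro (h | ⟨d, hdmem, hmod, hk⟩)
        · simp [PySem.Set.empty] at h
        · rw [PySem.List.mem_pyRange_one, Int.sqrt_natCast] at hdmem
          obtain ⟨hd1, hdlt⟩ := hdmem
          obtain ⟨dn, rfl⟩ : ∃ dn : Nat, d = (dn : Int) :=
            ⟨d.toNat, (Int.toNat_of_nonneg (by omega)).symm⟩
          rw [PySem.Int.mod_eq_zero_iff_dvd] at hmod
          have hdvd : dn ∣ oddPartN n := by exact_mod_cast hmod
          rcases hk with rfl | rfl
          · exact ⟨dn, rfl, hdvd⟩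
          · rw [PySem.Int.floordiv_natCast]
            exact ⟨oddPartN n / dn, rfl, Nat.div_dvd_of_dvd hdvd⟩
      · rintro ⟨kn, rfl, hdvd⟩
        obtain ⟨d, hd1, hds, hddvd, hk⟩ := (keyB (oddPartN n) kn hMpos).mpr hdvd
        right
        refine ⟨(d : Int), ?_, ?_, ?_⟩
        · rw [PySem.List.mem_pyRange_one, Int.sqrt_natCast]
          have : (d : Int) ≤ ((oddPartN n).sqrt : Int) := by exact_mod_cast hds
          constructor
          · exact_mod_cast hd1
          · omega
        · rw [PySem.Int.mod_eq_zero_iff_dvd]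
          exact_mod_cast hddvd
        · rcases hk with rfl | rfl
          · exact Or.inl rfl
          · right
            rw [PySem.Int.floordiv_natCast]
    constructor
    · rintro ⟨⟨hin, hk1⟩, hkn⟩
      obtain ⟨kn, rfl, hdvd⟩ := hInner.mp hin
      have h1 : kn ≠ 1 := by exact_mod_cast hk1
      have h2 : kn ≠ n := by exact_mod_cast hkn
      exact ⟨kn, rfl, (keyAB n kn hn).mp ⟨hdvd, h1, h2⟩⟩
    · rintro ⟨kn, rfl, hprop⟩
      obtain ⟨hdvdM, hne1, hnen⟩ := (keyAB n kn hn).mpr hprop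
      refine ⟨⟨hInner.mpr ⟨kn, rfl, hdvdM⟩, ?_⟩, ?_⟩
      · exact_mod_cast hne1
      · exact_mod_cast hnen

-- ===== VERDICT (by name: the statement is the Claim_ definition above) =====
theorem f_spec : Claim_equal_f := by
  intro N _hdom hpre
  unfold Spec_f
  obtain ⟨n, rfl⟩ : ∃ n : Nat, N = (n : Int) := ⟨N.toNat, (Int.toNat_of_nonneg hpre).symm⟩
  have hperm :
      ((PySem.List.pyRange 2 (Int.sqrt (n : Int) + 1) 1).foldl (stepA (n : Int)) PySem.Set.empty).Perm
      (PySem.Set.discard (PySem.Set.discard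
        ((PySem.List.pyRange 1 (Int.sqrt (oddPart (n : Int)) + 1) 1).foldl
          (stepB (oddPart (n : Int))) PySem.Set.empty) 1) ((n : Nat) : Int)) := by
    rw [List.perm_ext_iff_of_nodup]
    · intro k
      rw [memA, memB]
    · exact nodup_foldl_stepA _ _ _ List.nodup_nil
    · exact PySem.Set.nodup_discard _ _ (PySem.Set.nodup_discard _ _
        (nodup_foldl_stepB _ _ _ List.nodup_nil))
  have hsorted := PySem.List.sorted_eq_sorted_of_perm _ _ (fun x : Int => x)
    (fun _ _ h => h) hperm
  have hlen : PySem.Set.len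
      ((PySem.List.pyRange 2 (Int.sqrt (n : Int) + 1) 1).foldl (stepA (n : Int)) PySem.Set.empty)
      = PySem.Set.len (PySem.Set.discard (PySem.Set.discard
        ((PySem.List.pyRange 1 (Int.sqrt (oddPart (n : Int)) + 1) 1).foldl
          (stepB (oddPart (n : Int))) PySem.Set.empty) 1) ((n : Nat) : Int)) := by
    simp only [PySem.Set.len, hperm.length_eq]
  show f _ = f_alt _
  simp only [f, f_alt]
  rw [hsorted, hlen]
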